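-- pv_equiv track=rewrite | github.com/MojoisMojo/DSA | _LeetCode/1024/d.py | beautifulExtensions
-- ===== SOURCE A (Python) =====
-- def beautifulExtensions(s):
--     MOD = 998244353
--     n = len(s)
--     dp = [0] * (n + 1)
--     ones = 0
--     zeros = 0
--     for i in range(n):
--         if s[i] == '1':
--             ones += 1
--         else:
--             zeros += 1
--         if abs(ones - zeros) == 1:
--             dp[i + 1] = dp[i] + 1
--         dp[i + 1] %= MOD
--     return sum(dp) % MOD
--
-- s = "11001"
-- ===== SOURCE B (Python) =====
-- def beautifulExtensions(s):
--     MOD = 998244353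
--     # pass 1: collect lengths of maximal runs of positions with |balance| == 1
--     runs = []
--     bal = 0
--     cur = 0
--     for ch in s:
--         bal += 1 if ch == '1' else -1
--         if abs(bal) == 1:
--             cur += 1
--         else:
--             if cur:
--                 runs.append(cur)
--             cur = 0
--     if cur:
--         runs.append(cur)
--     # pass 2: each run of length L contributes the triangular number L*(L+1)//2
--     return sum(L * (L + 1) // 2 for L in runs) % MOD
-- ===== Notes on version B (the rewrite author's own statement) =====
-- stated objective: alternative
-- what changed: Replaced the per-position DP array (dp[i+1]=dp[i]+1 when |ones-zeros|==1, then sum(dp)) by a two-phase run-length scan: collect the lengths of maximal runs of prefixes with |balance|==1, then sum the triangular closed form L*(L+1)//2 per run, mod 998244353.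
import Mathlib
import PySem

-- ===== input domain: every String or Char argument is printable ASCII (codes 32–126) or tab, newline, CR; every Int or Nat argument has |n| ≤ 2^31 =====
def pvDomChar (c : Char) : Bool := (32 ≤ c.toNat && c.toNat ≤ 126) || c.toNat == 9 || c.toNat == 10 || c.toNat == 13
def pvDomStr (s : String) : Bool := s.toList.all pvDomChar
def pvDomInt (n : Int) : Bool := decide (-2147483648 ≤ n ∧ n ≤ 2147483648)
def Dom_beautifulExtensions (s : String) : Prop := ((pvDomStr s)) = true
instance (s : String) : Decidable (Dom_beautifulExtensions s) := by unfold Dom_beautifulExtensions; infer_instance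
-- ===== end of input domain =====

-- B replaces A's per-position DP array by a run-length scan plus the triangular closed form per run (alternative decomposition, same cost).


-- ===== PORT A =====
-- dp entries are produced strictly in index order, so the dp array is carried as a
-- list with the newest entry at the head (sum(dp) is order-independent).
def stepA (st : Int × Int × List Int) (c : Char) : Int × Int × List Int :=
  let ones := if c = '1' then st.1 + 1 else st.1
  let zeros := if c = '1' then st.2.1 else st.2.1 + 1
  let v := if (ones - zeros).natAbs = 1 then st.2.2.headI + 1 else 0
  (ones, zeros, PySem.Int.mod v 998244353 :: st.2.2)

def beautifulExtensions (s : String) : Int :=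
  let st := s.toList.foldl stepA (0, 0, [0])
  PySem.Int.mod st.2.2.sum 998244353

-- ===== PORT B =====
-- pass 1 state: (balance, current run length, closed run lengths)
def stepB (st : Int × Int × List Int) (c : Char) : Int × Int × List Int :=
  let bal := st.1 + (if c = '1' then 1 else -1)
  if bal.natAbs = 1 then (bal, st.2.1 + 1, st.2.2)
  else (bal, 0, if st.2.1 ≠ 0 then st.2.2 ++ [st.2.1] else st.2.2)

def triB (L : Int) : Int := PySem.Int.floordiv (L * (L + 1)) 2

def beautifulExtensions_alt (s : String) : Int :=
  let st := s.toList.foldl stepB (0, 0, [])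
  let runs := if st.2.1 ≠ 0 then st.2.2 ++ [st.2.1] else st.2.2
  PySem.Int.mod (runs.map triB).sum 998244353

-- ===== PRECONDITION & SPEC =====
def Spec_beautifulExtensions (s : String) (out : Int) : Prop := out = beautifulExtensions_alt s
instance (s : String) (out : Int) : Decidable (Spec_beautifulExtensions s out) := by unfold Spec_beautifulExtensions; infer_instance

-- ===== CLAIM (what is proved, stated in full; the proofs are below) =====
def Claim_equal_beautifulExtensions : Prop := ∀ (s : String), Dom_beautifulExtensions s → Spec_beautifulExtensions s (beautifulExtensions s)

-- ===== LEMMAS AND PROOFS =====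

theorem modM (x : Int) : PySem.Int.mod x 998244353 = x % 998244353 :=
  PySem.Int.mod_eq_emod_of_pos (by norm_num)

-- relation between A's loop state and B's loop state
def relAB (a b : Int × Int × List Int) : Prop :=
  a.1 - a.2.1 = b.1 ∧ 0 ≤ b.2.1 ∧ a.2.2.headI = b.2.1 % 998244353 ∧
    a.2.2.sum % 998244353 = ((b.2.2.map triB).sum + triB b.2.1) % 998244353

theorem triB_zero : triB 0 = 0 := by decide

theorem triB_succ (L : Int) (_h : 0 ≤ L) : triB (L + 1) = triB L + (L + 1) := by
  unfold triB
  rw [PySem.Int.floordiv_eq_ediv_of_pos (by norm_num),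
      PySem.Int.floordiv_eq_ediv_of_pos (by norm_num)]
  obtain ⟨k, hk⟩ := Int.even_mul_succ_self L
  have hk2 : L * (L + 1) = 2 * k := by omega
  have h2 : (L + 1) * (L + 1 + 1) = 2 * (k + (L + 1)) := by linear_combination hk2
  rw [hk2, h2, Int.mul_ediv_cancel_left _ (by norm_num),
      Int.mul_ediv_cancel_left _ (by norm_num)]

theorem stepAB (a b : Int × Int × List Int) (c : Char) (h : relAB a b) :
    relAB (stepA a c) (stepB b c) := by
  obtain ⟨o, z, dp⟩ := a
  obtain ⟨bal, cur, runs⟩ := b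
  obtain ⟨h1, h2, h3, h4⟩ := h
  simp only at h1 h2 h3 h4
  unfold relAB stepA stepB
  simp only [modM]
  have hbal : ((if c = '1' then o + 1 else o) - if c = '1' then z else z + 1)
      = bal + (if c = '1' then 1 else -1) := by
    by_cases hC : c = '1' <;> simp only [hC, if_true, if_false] <;> omega
  rw [hbal]
  by_cases hc : (bal + (if c = '1' then 1 else -1)).natAbs = 1
  · simp only [hc, if_true]
    refine ⟨trivial, by omega, ?_, ?_⟩
    · simp only [List.headI_cons]; rw [h3]; omega
    · simp only [List.sum_cons]; rw [h3, triB_succ cur h2]; omega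
  · simp only [hc, if_false]
    refine ⟨trivial, le_refl 0, by simp, ?_⟩
    simp only [List.sum_cons, triB_zero]
    by_cases hz : cur = 0
    · rw [if_neg (by simp [hz])]
      rw [hz, triB_zero] at h4
      omega
    · rw [if_pos hz]
      simp only [List.map_append, List.sum_append, List.map_cons, List.map_nil,
        List.sum_cons, List.sum_nil]
      omega

theorem foldAB (l : List Char) (a b : Int × Int × List Int) (h : relAB a b) :
    relAB (l.foldl stepA a) (l.foldl stepB b) := by
  induction l generalizing a b with
  | nil => exact h
  | cons c t ih => exact ih _ _ (stepAB a b c h)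

-- ===== VERDICT =====
theorem beautifulExtensions_spec : Claim_equal_beautifulExtensions := by
  unfold Claim_equal_beautifulExtensions
  intro s _
  unfold Spec_beautifulExtensions beautifulExtensions beautifulExtensions_alt
  have h := foldAB s.toList (0, 0, [0]) (0, 0, [])
    ⟨by norm_num, le_refl 0, by norm_num [List.headI], by norm_num [triB_zero]⟩
  obtain ⟨-, h2, -, h4⟩ := h
  simp only [modM]
  by_cases hz : (s.toList.foldl stepB (0, 0, [])).2.1 = 0
  · rw [if_neg (by simp [hz])]
    rw [hz, triB_zero] at h4
    omega
  · rw [if_pos hz]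
    simp only [List.map_append, List.sum_append, List.map_cons, List.map_nil,
      List.sum_cons, List.sum_nil]
    omega
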